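-- pv_equiv track=rewrite | github.com/Tunasss/MSIS3033.Q21.CTTT | backend/app.py | order_categories
-- ===== SOURCE A (Python) =====
-- def order_categories(categories):
--     """Return categories ordered by preferred display order, Others last."""
--     preferred = ["Food", "Transport", "Study", "Shopping", "Others"]
--     preferred_lower = [c.lower() for c in preferred]
--
--     def sort_key(cat):
--         cat_str = str(cat)
--         cat_lower = cat_str.lower()
--         if cat_lower in preferred_lower:
--             return (0, preferred_lower.index(cat_lower), cat_str)
--         return (1, 0, cat_str)
--
--     return sorted(categories, key=sort_key)
-- ===== SOURCE B (Python) =====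
-- def order_categories(categories):
--     """Return categories ordered by preferred display order, Others last."""
--     preferred = ["Food", "Transport", "Study", "Shopping", "Others"]
--     index_dict = {name.lower(): i for i, name in enumerate(preferred)}
--     known = [c for c in categories if str(c).lower() in index_dict]
--     unknown = [c for c in categories if str(c).lower() not in index_dict]
--     known.sort(key=lambda c: (index_dict[str(c).lower()], str(c)))
--     unknown.sort(key=str)
--     return known + unknown
-- ===== Notes on version B (the rewrite author's own statement) =====
-- stated objective: alternative
-- what changed: A sorts the whole list once with a composite (flag, index, name) key; B partitions the input into known and unknown categories via a lowercase-name-to-index dict, sorts the two parts separately ((index, name) and name), and concatenates them.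
import Mathlib
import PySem

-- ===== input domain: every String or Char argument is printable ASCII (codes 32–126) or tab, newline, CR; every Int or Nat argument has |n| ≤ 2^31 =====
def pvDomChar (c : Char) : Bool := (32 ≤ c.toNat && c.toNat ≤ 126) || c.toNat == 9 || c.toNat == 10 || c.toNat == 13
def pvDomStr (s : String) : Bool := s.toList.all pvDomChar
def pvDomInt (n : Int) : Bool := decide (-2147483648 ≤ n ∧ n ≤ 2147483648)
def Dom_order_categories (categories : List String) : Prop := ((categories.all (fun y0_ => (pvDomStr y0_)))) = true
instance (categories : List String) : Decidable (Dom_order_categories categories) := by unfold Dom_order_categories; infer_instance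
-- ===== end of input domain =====

-- B replaces A's single composite-key sort by a partition into known/unknown plus two
-- smaller sorts and a concatenation (objective: alternative decomposition, same cost).

-- ===== PORT A =====
def pvPreferred : List String := ["Food", "Transport", "Study", "Shopping", "Others"]
def pvPreferredLower : List String := pvPreferred.map PySem.Str.lower

-- A's sort_key returns the 3-tuple (flag, idx, cat_str); PySem covers two-component keys
-- (sorted2), so the two integer components are combined as flag*5+idx — exact because
-- idx = preferred_lower.index(...) < 5 whenever the first branch is taken.
-- .index is ported as index? ... .getD 0; exact because it is only reached after the
-- membership test succeeds.  str(cat) on a string is the string itself.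
def pvSortKey1 (cat : String) : Int :=
  let cat_lower := PySem.Str.lower cat
  if cat_lower ∈ pvPreferredLower then
    0 * 5 + (((PySem.List.index? pvPreferredLower cat_lower).getD 0 : Nat) : Int)
  else 1 * 5 + 0

def order_categories (categories : List String) : List String :=
  PySem.List.sorted2 categories pvSortKey1 (fun cat => cat)

-- ===== PORT B =====
-- {name.lower(): i for i, name in enumerate(preferred)}
def pvIndexDict : PySem.Dict String Int :=
  (PySem.List.enumerate pvPreferred 0).foldl
    (fun d p => d.insert (PySem.Str.lower p.2) p.1) PySem.Dict.empty

-- index_dict[str(c).lower()] ported as get? ... .getD 0; exact because the known list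
-- only holds elements whose lowercased form is a key of the dict.
def order_categories_alt (categories : List String) : List String :=
  let known := categories.filter (fun c => pvIndexDict.contains (PySem.Str.lower c))
  let unknown := categories.filter (fun c => !(pvIndexDict.contains (PySem.Str.lower c)))
  PySem.List.sorted2 known (fun c => (pvIndexDict.get? (PySem.Str.lower c)).getD 0) (fun c => c)
    ++ PySem.List.sorted unknown (fun c => c)

-- ===== PRECONDITION & SPEC =====
def Spec_order_categories (categories : List String) (out : List String) : Prop := out = order_categories_alt categories
instance (categories : List String) (out : List String) : Decidable (Spec_order_categories categories out) := by unfold Spec_order_categories; infer_instance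

-- ===== CLAIM (what is proved, stated in full; the proofs are below) =====
def Claim_equal_order_categories : Prop := ∀ (categories : List String), Dom_order_categories categories → Spec_order_categories categories (order_categories categories)

-- ===== LEMMAS AND PROOFS =====

-- the comparator sorted2 builds from A's keys
def pvLtA (a b : String) : Bool :=
  decide (pvSortKey1 a < pvSortKey1 b) || (!decide (pvSortKey1 b < pvSortKey1 a) && decide (a < b))

def pvKeyB (c : String) : Int := (pvIndexDict.get? (PySem.Str.lower c)).getD 0

def pvLtB (a b : String) : Bool :=
  decide (pvKeyB a < pvKeyB b) || (!decide (pvKeyB b < pvKeyB a) && decide (a < b))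

def pvP (c : String) : Bool := pvIndexDict.contains (PySem.Str.lower c)

lemma pv_lower_eq : pvPreferredLower = ["food", "transport", "study", "shopping", "others"] := rfl

lemma pv_dict_eq : pvIndexDict =
    (((((PySem.Dict.empty.insert "food" (0 : Int)).insert "transport" 1).insert "study" 2).insert
      "shopping" 3).insert "others" 4) := rfl

lemma pv_get?_dict (t : String) :
    pvIndexDict.get? t = (PySem.List.index? pvPreferredLower t).map (fun n => (n : Int)) := by
  rw [pv_dict_eq, pv_lower_eq]
  by_cases h1 : t = "food"
  · subst h1; decide
  by_cases h2 : t = "transport"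
  · subst h2; decide
  by_cases h3 : t = "study"
  · subst h3; decide
  by_cases h4 : t = "shopping"
  · subst h4; decide
  by_cases h5 : t = "others"
  · subst h5; decide
  simp [PySem.Dict.get?_insert, PySem.Dict.get?_empty, PySem.List.index?_eq_idxOf?,
    List.idxOf?, List.findIdx?, List.findIdx?.go, h1, h2, h3, h4, h5,
    Ne.symm h1, Ne.symm h2, Ne.symm h3, Ne.symm h4, Ne.symm h5]

lemma pv_contains_dict (t : String) :
    pvIndexDict.contains t = decide (t ∈ pvPreferredLower) := by
  have h := pv_get?_dict t
  by_cases hm : t ∈ pvPreferredLower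
  · rcases Option.isSome_iff_exists.mp ((PySem.List.index?_isSome_iff _ _).mpr hm) with ⟨k, hk⟩
    have : pvIndexDict.get? t = some (k : Int) := by rw [h, hk]; rfl
    have hc : pvIndexDict.contains t = true := by
      cases hcc : pvIndexDict.contains t
      · rw [(PySem.Dict.get?_eq_none_iff_contains pvIndexDict t).mpr hcc] at this
        exact absurd this (by simp)
      · rfl
    simp [hc, hm]
  · have hn : PySem.List.index? pvPreferredLower t = none := by
      simpa using (PySem.List.index?_eq_none_iff _ _).mpr hm
    have : pvIndexDict.get? t = none := by rw [h, hn]; rfl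
    have hc := (PySem.Dict.get?_eq_none_iff_contains pvIndexDict t).mp this
    simp [hc, hm]

lemma pv_keyA_of_mem {c : String} (h : PySem.Str.lower c ∈ pvPreferredLower) :
    pvSortKey1 c = pvKeyB c ∧ pvSortKey1 c < 5 := by
  rcases Option.isSome_iff_exists.mp ((PySem.List.index?_isSome_iff _ _).mpr h) with ⟨k, hk⟩
  obtain ⟨hklt, -, -⟩ := PySem.List.getElem_of_index?_eq_some hk
  have hlen : pvPreferredLower.length = 5 := rfl
  constructor
  · simp only [pvSortKey1, pvKeyB]
    rw [if_pos h, pv_get?_dict, hk]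
    simp
  · simp only [pvSortKey1]
    rw [if_pos h, hk]
    simp only [Option.getD_some]
    have : k < 5 := by rw [hlen] at hklt; omega
    omega

lemma pv_keyA_of_not_mem {c : String} (h : PySem.Str.lower c ∉ pvPreferredLower) :
    pvSortKey1 c = 5 := by
  simp [pvSortKey1, h]

lemma pv_P_iff (c : String) : pvP c = true ↔ PySem.Str.lower c ∈ pvPreferredLower := by
  simp [pvP, pv_contains_dict]

lemma pv_ltA_split {a b : String} (ha : pvP a = true) (hb : pvP b = false) :
    pvLtA a b = true ∧ pvLtA b a = false := by
  obtain ⟨-, hlt⟩ := pv_keyA_of_mem ((pv_P_iff a).mp ha)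
  have hnb : PySem.Str.lower b ∉ pvPreferredLower := by
    intro hm
    rw [(pv_P_iff b).mpr hm] at hb; exact absurd hb (by simp)
  have hb5 := pv_keyA_of_not_mem hnb
  constructor
  · simp [pvLtA, hb5]; omega
  · simp [pvLtA, hb5]
    constructor
    · omega
    · intro h; omega

lemma pv_insertBy_append_left {α : Type} (lt : α → α → Bool) (x : α) (A B : List α)
    (h : ∀ b ∈ B, lt x b = true) :
    PySem.List.insertBy lt x (A ++ B) = PySem.List.insertBy lt x A ++ B := by
  induction A with
  | nil =>
    cases B with
    | nil => rfl
    | cons b bs => simp [PySem.List.insertBy, h b (by simp)]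
  | cons a as ih =>
    simp only [List.cons_append, PySem.List.insertBy]
    split <;> simp [ih]

lemma pv_insertBy_append_right {α : Type} (lt : α → α → Bool) (x : α) (A B : List α)
    (h : ∀ a ∈ A, lt x a = false) :
    PySem.List.insertBy lt x (A ++ B) = A ++ PySem.List.insertBy lt x B := by
  induction A with
  | nil => rfl
  | cons a as ih =>
    simp only [List.cons_append, PySem.List.insertBy, h a (by simp)]
    simp only [Bool.false_eq_true, if_false]
    rw [ih (fun a ha => h a (by simp [ha]))]

lemma pv_foldl_insert_split {α : Type} (lt : α → α → Bool) (p : α → Bool)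
    (hlt : ∀ a b, p a = true → p b = false → lt a b = true ∧ lt b a = false)
    (l : List α) : ∀ (A B : List α), (∀ a ∈ A, p a = true) → (∀ b ∈ B, p b = false) →
    l.foldl (fun acc x => PySem.List.insertBy lt x acc) (A ++ B)
    = (l.filter p).foldl (fun acc x => PySem.List.insertBy lt x acc) A
      ++ (l.filter (fun x => !p x)).foldl (fun acc x => PySem.List.insertBy lt x acc) B := by
  induction l with
  | nil => intro A B _ _; simp
  | cons x l ih =>
    intro A B hA hB
    by_cases hx : p x = true
    · have h1 : PySem.List.insertBy lt x (A ++ B) = PySem.List.insertBy lt x A ++ B :=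
        pv_insertBy_append_left lt x A B (fun b hb => (hlt x b hx (hB b hb)).1)
      simp only [List.foldl_cons, h1, List.filter_cons, hx, if_true]
      have : ∀ a ∈ PySem.List.insertBy lt x A, p a = true := by
        intro a ha
        rcases (PySem.List.mem_insertBy _ _ _ _).mp ha with h | h
        · exact h ▸ hx
        · exact hA a h
      simpa [hx] using ih (PySem.List.insertBy lt x A) B this hB
    · have hx' : p x = false := by simpa using hx
      have h1 : PySem.List.insertBy lt x (A ++ B) = A ++ PySem.List.insertBy lt x B :=
        pv_insertBy_append_right lt x A B (fun a ha => (hlt a x (hA a ha) hx').2)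
      simp only [List.foldl_cons, h1, List.filter_cons, hx']
      have : ∀ b ∈ PySem.List.insertBy lt x B, p b = false := by
        intro b hb
        rcases (PySem.List.mem_insertBy _ _ _ _).mp hb with h | h
        · exact h ▸ hx'
        · exact hB b h
      simpa [hx'] using ih A (PySem.List.insertBy lt x B) hA this

lemma pv_insertBy_congr {α : Type} (f g : α → α → Bool) (x : α) (ys : List α)
    (h : ∀ y ∈ ys, f x y = g x y) :
    PySem.List.insertBy f x ys = PySem.List.insertBy g x ys := by
  induction ys with
  | nil => rfl
  | cons y ys ih =>
    simp only [PySem.List.insertBy, h y (by simp)]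
    split <;> simp [ih (fun y hy => h y (by simp [hy]))]

lemma pv_foldl_insertBy_congr {α : Type} (f g : α → α → Bool) (l : List α) :
    ∀ (A : List α), (∀ x ∈ l, ∀ y, (y ∈ A ∨ y ∈ l) → f x y = g x y) →
    l.foldl (fun acc x => PySem.List.insertBy f x acc) A
      = l.foldl (fun acc x => PySem.List.insertBy g x acc) A := by
  induction l with
  | nil => intro A _; rfl
  | cons x l ih =>
    intro A h
    simp only [List.foldl_cons]
    rw [pv_insertBy_congr f g x A (fun y hy => h x (by simp) y (Or.inl hy))]
    apply ih
    intro z hz y hy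
    apply h z (by simp [hz])
    rcases hy with hy | hy
    · rcases (PySem.List.mem_insertBy _ _ _ _).mp hy with h' | h'
      · exact Or.inr (by simp [h'])
      · exact Or.inl h'
    · exact Or.inr (by simp [hy])

-- ===== VERDICT (by name: the statement is the Claim_ definition above) =====
lemma pv_ltA_eq_ltB {a b : String} (ha : pvP a = true) (hb : pvP b = true) :
    pvLtA a b = pvLtB a b := by
  obtain ⟨hea, -⟩ := pv_keyA_of_mem ((pv_P_iff a).mp ha)
  obtain ⟨heb, -⟩ := pv_keyA_of_mem ((pv_P_iff b).mp hb)
  simp [pvLtA, pvLtB, hea, heb]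

lemma pv_ltA_eq_lt {a b : String} (ha : pvP a = false) (hb : pvP b = false) :
    pvLtA a b = decide (a < b) := by
  have hna : PySem.Str.lower a ∉ pvPreferredLower := by
    intro hm; rw [(pv_P_iff a).mpr hm] at ha; exact absurd ha (by simp)
  have hnb : PySem.Str.lower b ∉ pvPreferredLower := by
    intro hm; rw [(pv_P_iff b).mpr hm] at hb; exact absurd hb (by simp)
  simp [pvLtA, pv_keyA_of_not_mem hna, pv_keyA_of_not_mem hnb]

theorem order_categories_spec : Claim_equal_order_categories := by
  intro categories _
  unfold Spec_order_categories order_categories order_categories_alt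
  show PySem.List.sorted2 categories pvSortKey1 (fun cat => cat)
      = PySem.List.sorted2 (categories.filter (fun c => pvIndexDict.contains (PySem.Str.lower c)))
          (fun c => (pvIndexDict.get? (PySem.Str.lower c)).getD 0) (fun c => c)
        ++ PySem.List.sorted (categories.filter (fun c => !(pvIndexDict.contains (PySem.Str.lower c))))
          (fun c => c)
  have hA : PySem.List.sorted2 categories pvSortKey1 (fun cat => cat)
      = categories.foldl (fun acc x => PySem.List.insertBy pvLtA x acc) [] := rfl
  rw [hA]
  have split := pv_foldl_insert_split pvLtA pvP
    (fun a b ha hb => pv_ltA_split ha hb) categories [] [] (by simp) (by simp)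
  simp only [List.append_nil] at split
  rw [split]
  congr 1
  · rw [pv_foldl_insertBy_congr pvLtA pvLtB (categories.filter pvP) []
      (fun x hx y hy => by
        rcases hy with hy | hy
        · simp at hy
        · exact pv_ltA_eq_ltB (List.of_mem_filter hx) (List.of_mem_filter hy))]
    rfl
  · rw [pv_foldl_insertBy_congr pvLtA (fun a b => decide (a < b))
      (categories.filter (fun x => !pvP x)) []
      (fun x hx y hy => by
        rcases hy with hy | hy
        · simp at hy
        · have hx' : pvP x = false := by simpa using List.of_mem_filter hx
          have hy' : pvP y = false := by simpa using List.of_mem_filter hy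
          exact pv_ltA_eq_lt hx' hy')]
    rfl
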